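-- pv_equiv track=rewrite | github.com/MarisaKirisame/MemoryBalancer | python/parse_balancer_out.py | chunking
-- ===== SOURCE A (Python) =====
-- def chunking(filtered_logs):
-- 	chunks = []
-- 	tmp = []
-- 	for log in filtered_logs:
-- 		if log.startswith("|name"):
-- 			if len(tmp) > 0:
-- 				chunks.append(tmp)
-- 			tmp = []
-- 		else:
-- 			tmp.append(log)
-- 	if len(tmp) > 0:
-- 		chunks.append(tmp)
-- 	return chunks
-- ===== SOURCE B (Python) =====
-- def chunking(filtered_logs):
--     marks = [i for i, log in enumerate(filtered_logs) if log.startswith("|name")]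
--     bounds = [-1] + marks + [len(filtered_logs)]
--     chunks = []
--     for a, b in zip(bounds, bounds[1:]):
--         chunk = filtered_logs[a + 1:b]
--         if chunk:
--             chunks.append(chunk)
--     return chunks
-- ===== Notes on version B (the rewrite author's own statement) =====
-- stated objective: alternative
-- what changed: Replaces A's single-pass accumulator state machine (tmp buffer flushed at each '|name' marker) by two passes: collect the marker indices with enumerate, then slice the list between consecutive bounds (-1, marks..., len) and keep the non-empty slices.
import Mathlib
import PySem

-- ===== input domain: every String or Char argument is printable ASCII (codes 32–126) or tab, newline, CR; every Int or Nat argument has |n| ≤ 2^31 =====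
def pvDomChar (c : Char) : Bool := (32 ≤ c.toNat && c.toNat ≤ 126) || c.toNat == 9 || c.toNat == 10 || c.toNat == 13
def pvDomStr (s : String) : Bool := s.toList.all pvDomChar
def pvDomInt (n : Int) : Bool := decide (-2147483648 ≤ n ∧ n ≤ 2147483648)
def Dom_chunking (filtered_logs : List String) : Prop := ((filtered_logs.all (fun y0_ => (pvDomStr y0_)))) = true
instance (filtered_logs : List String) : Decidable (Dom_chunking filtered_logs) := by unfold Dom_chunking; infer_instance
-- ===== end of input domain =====

-- B replaces A's accumulator state machine by a marker-index pass followed by slicing; objective: alternative decomposition.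

-- ===== PORT A =====
-- state = (chunks, tmp); the loop body is A's, branch for branch
def chunking (filtered_logs : List String) : List (List String) :=
  let st := filtered_logs.foldl
    (fun (st : List (List String) × List String) log =>
      if PySem.Str.startswith log "|name" then
        (if st.2.length > 0 then st.1 ++ [st.2] else st.1, ([] : List String))
      else
        (st.1, st.2 ++ [log]))
    ([], [])
  if st.2.length > 0 then st.1 ++ [st.2] else st.1

-- ===== PORT B =====
-- marker indices via enumerate, then bounds = -1 :: marks ++ [len], then one slice per adjacent pair
def chunking_alt (filtered_logs : List String) : List (List String) :=
  let marks : List Int :=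
    ((PySem.List.enumerate filtered_logs 0).filter
      (fun p => PySem.Str.startswith p.2 "|name")).map (fun p => p.1)
  let bounds : List Int := -1 :: (marks ++ [(filtered_logs.length : Int)])
  (bounds.zip bounds.tail).foldl
    (fun chunks q =>
      let chunk := PySem.List.slice filtered_logs (some (q.1 + 1)) (some q.2)
      if chunk ≠ [] then chunks ++ [chunk] else chunks)
    []

-- ===== PRECONDITION & SPEC =====
def Spec_chunking (filtered_logs : List String) (out : List (List String)) : Prop := out = chunking_alt filtered_logs
instance (filtered_logs : List String) (out : List (List String)) : Decidable (Spec_chunking filtered_logs out) := by unfold Spec_chunking; infer_instance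

-- ===== CLAIM (what is proved, stated in full; the proofs are below) =====
def Claim_equal_chunking : Prop := ∀ (filtered_logs : List String), Dom_chunking filtered_logs → Spec_chunking filtered_logs (chunking filtered_logs)

-- ===== LEMMAS AND PROOFS =====

-- the marker test, abbreviated
def pvMark (s : String) : Bool := PySem.Str.startswith s "|name"

-- the segments of the log list cut at markers, markers dropped, empties kept
def pvSegs : List String → List (List String)
  | [] => [[]]
  | x :: xs =>
    if pvMark x then [] :: pvSegs xs
    else
      match pvSegs xs with
      | s :: r => (x :: s) :: r
      | [] => [[x]]

lemma pvSegs_ne_nil (xs : List String) : pvSegs xs ≠ [] := by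
  cases xs with
  | nil => simp [pvSegs]
  | cons x xs =>
    simp only [pvSegs]
    split
    · simp
    · split <;> simp_all

def pvMapHead (f : List String → List String) : List (List String) → List (List String)
  | [] => []
  | s :: r => f s :: r

-- ===== A side: the state machine computes the filtered segments =====
def pvStep (st : List (List String) × List String) (log : String) :
    List (List String) × List String :=
  if pvMark log then
    (if st.2.length > 0 then st.1 ++ [st.2] else st.1, ([] : List String))
  else
    (st.1, st.2 ++ [log])

def pvFin (st : List (List String) × List String) : List (List String) :=
  if st.2.length > 0 then st.1 ++ [st.2] else st.1

lemma chunking_loop (logs : List String) : ∀ (acc : List (List String)) (tmp : List String),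
    pvFin (logs.foldl pvStep (acc, tmp))
    = acc ++ (pvMapHead (tmp ++ ·) (pvSegs logs)).filter (fun c => c ≠ []) := by
  induction logs with
  | nil =>
    intro acc tmp
    cases tmp <;> simp [pvFin, pvSegs, pvMapHead]
  | cons x xs ih =>
    intro acc tmp
    rw [List.foldl_cons]
    cases hm : pvMark x with
    | true =>
      rw [show pvStep (acc, tmp) x
            = (if tmp.length > 0 then acc ++ [tmp] else acc, ([] : List String)) from by
          simp [pvStep, hm], ih]
      cases h : pvSegs xs with
      | nil => exact absurd h (pvSegs_ne_nil xs)
      | cons s r =>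
        have hseg : pvSegs (x :: xs) = [] :: s :: r := by simp [pvSegs, hm, h]
        rw [hseg]
        cases tmp <;> simp [pvMapHead]
    | false =>
      rw [show pvStep (acc, tmp) x = (acc, tmp ++ [x]) from by simp [pvStep, hm], ih]
      cases h : pvSegs xs with
      | nil => exact absurd h (pvSegs_ne_nil xs)
      | cons s r =>
        have hseg : pvSegs (x :: xs) = (x :: s) :: r := by simp [pvSegs, hm, h]
        rw [hseg]
        simp [pvMapHead]

lemma chunking_eq_segs (logs : List String) :
    chunking logs = (pvSegs logs).filter (fun c => c ≠ []) := by
  have h : chunking logs = pvFin (logs.foldl pvStep ([], [])) := rfl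
  rw [h, chunking_loop logs [] []]
  cases h2 : pvSegs logs with
  | nil => exact absurd h2 (pvSegs_ne_nil logs)
  | cons s r => simp [pvMapHead]

-- ===== B side =====

-- marker positions as naturals, recursively
def pvMarksN : List String → List Nat
  | [] => []
  | x :: xs => if pvMark x then 0 :: (pvMarksN xs).map (· + 1) else (pvMarksN xs).map (· + 1)

lemma marks_eq (logs : List String) : ∀ (s : Int),
    ((PySem.List.enumerate logs s).filter
      (fun p => PySem.Str.startswith p.2 "|name")).map (fun p => p.1)
    = (pvMarksN logs).map (fun (n : Nat) => ((n : Int) + s)) := by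
  induction logs with
  | nil => intro s; simp [PySem.List.enumerate_nil, pvMarksN]
  | cons x xs ih =>
    intro s
    rw [PySem.List.enumerate_cons, List.filter_cons]
    cases hm : pvMark x with
    | true =>
      have hm' : (fun p : Int × String => PySem.Str.startswith p.2 "|name") (s, x) = true := hm
      rw [if_pos hm']
      simp only [List.map_cons, ih (s + 1), pvMarksN, hm, if_true, List.map_map]
      refine List.cons_eq_cons.mpr ⟨by norm_num, ?_⟩
      apply List.map_congr_left
      intro n _
      simp only [Function.comp_apply]
      push_cast
      ring
    | false =>
      have hm' : ¬ ((fun p : Int × String => PySem.Str.startswith p.2 "|name") (s, x) = true) := by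
        intro hc
        have hc2 : pvMark x = true := hc
        rw [hm] at hc2
        cases hc2
      rw [if_neg hm']
      simp only [ih (s + 1), pvMarksN, hm, Bool.false_eq_true, if_false, List.map_map]
      apply List.map_congr_left
      intro n _
      simp only [Function.comp_apply]
      push_cast
      ring

-- the list of slices cut by a bounds list, recursively
def pvSliceChunks (logs : List String) (a : Int) : List Nat → List (List String)
  | [] => []
  | b :: r => PySem.List.slice logs (some (a + 1)) (some (b : Int)) :: pvSliceChunks logs (b : Int) r

lemma slice_cons_shift (x : String) (xs : List String) (c : Int) (b : Nat) (hc : 0 ≤ c) :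
    PySem.List.slice (x :: xs) (some (c + 1)) (some ((b + 1 : Nat) : Int)) =
    PySem.List.slice xs (some c) (some (b : Int)) := by
  rw [PySem.List.slice_toNat _ (by omega) (by positivity),
      PySem.List.slice_toNat _ hc (by positivity)]
  have h1 : (c + 1).toNat = c.toNat + 1 := by omega
  have h2 : (((b + 1 : Nat) : Int)).toNat = b + 1 := by omega
  have h3 : ((b : Int)).toNat = b := by omega
  rw [h1, h2, h3, List.drop_succ_cons]
  congr 1
  omega

lemma sliceChunks_shift (x : String) (xs : List String) :
    ∀ (B : List Nat) (a : Int), 0 ≤ a + 1 →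
    pvSliceChunks (x :: xs) (a + 1) (B.map (· + 1)) = pvSliceChunks xs a B := by
  intro B
  induction B with
  | nil => intro a _; rfl
  | cons b r ih =>
    intro a ha
    simp only [List.map_cons, pvSliceChunks]
    refine List.cons_eq_cons.mpr ⟨slice_cons_shift x xs (a + 1) b ha, ?_⟩
    rw [show ((b + 1 : Nat) : Int) = ((b : Nat) : Int) + 1 by push_cast; ring,
        ih (b : Int) (by positivity)]

lemma sliceChunks_eq_segs (logs : List String) :
    pvSliceChunks logs (-1) (pvMarksN logs ++ [logs.length]) = pvSegs logs := by
  induction logs with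
  | nil =>
    simp only [pvMarksN, pvSegs, List.nil_append, List.length_nil, pvSliceChunks]
    rw [show (-1 : Int) + 1 = ((0 : Nat) : Int) by norm_num, PySem.List.slice_natCast]
    simp
  | cons x xs ih =>
    have hmap : ((pvMarksN xs).map (· + 1) ++ [xs.length + 1])
        = (pvMarksN xs ++ [xs.length]).map (· + 1) := by simp
    cases hm : pvMark x with
    | true =>
      have hmarks : pvMarksN (x :: xs) = 0 :: (pvMarksN xs).map (· + 1) := by
        simp [pvMarksN, hm]
      have hseglem : pvSegs (x :: xs) = [] :: pvSegs xs := by simp [pvSegs, hm]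
      rw [hmarks, hseglem, List.length_cons, List.cons_append, hmap]
      simp only [pvSliceChunks]
      refine List.cons_eq_cons.mpr ⟨?_, ?_⟩
      · rw [show (-1 : Int) + 1 = ((0 : Nat) : Int) by norm_num, PySem.List.slice_natCast]
        simp
      · rw [show ((0 : Nat) : Int) = (-1 : Int) + 1 by norm_num,
            sliceChunks_shift x xs _ (-1) (by norm_num), ih]
    | false =>
      have hmarks : pvMarksN (x :: xs) = (pvMarksN xs).map (· + 1) := by
        simp [pvMarksN, hm]
      rw [hmarks, List.length_cons, hmap]
      cases hB : pvMarksN xs ++ [xs.length] with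
      | nil => simp at hB
      | cons b r =>
        rw [hB] at ih
        cases hseg : pvSegs xs with
        | nil => exact absurd hseg (pvSegs_ne_nil xs)
        | cons s rest =>
          rw [hseg] at ih
          simp only [pvSliceChunks] at ih
          obtain ⟨ih1, ih2⟩ := List.cons_eq_cons.mp ih
          have hseglem : pvSegs (x :: xs) = (x :: s) :: rest := by simp [pvSegs, hm, hseg]
          rw [hseglem]
          simp only [List.map_cons, pvSliceChunks]
          refine List.cons_eq_cons.mpr ⟨?_, ?_⟩
          · rw [show (-1 : Int) + 1 = ((0 : Nat) : Int) by norm_num,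
                PySem.List.slice_natCast]
            rw [show (-1 : Int) + 1 = ((0 : Nat) : Int) by norm_num,
                PySem.List.slice_natCast] at ih1
            simp only [Nat.sub_zero, List.drop_zero] at ih1 ⊢
            rw [List.take_succ_cons, ih1]
          · rw [show ((b + 1 : Nat) : Int) = ((b : Nat) : Int) + 1 by push_cast; ring,
                sliceChunks_shift x xs r (b : Int) (by positivity), ih2]

-- the port's zip-of-bounds map is pvSliceChunks
lemma zip_bounds_eq (logs : List String) :
    ∀ (L : List Nat) (a : Int),
    (((a :: L.map (fun (n : Nat) => (n : Int))).zip (L.map (fun (n : Nat) => (n : Int)))).map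
      (fun q => PySem.List.slice logs (some (q.1 + 1)) (some q.2)))
    = pvSliceChunks logs a L := by
  intro L
  induction L with
  | nil => intro a; rfl
  | cons b r ih =>
    intro a
    simp only [List.map_cons, List.zip_cons_cons, pvSliceChunks]
    rw [← ih (b : Int)]

-- and the fold with conditional append is filter of the mapped list
lemma foldl_if_append_slices (logs : List String) (L : List (Int × Int)) :
    ∀ (acc : List (List String)),
    L.foldl
      (fun chunks q =>
        let chunk := PySem.List.slice logs (some (q.1 + 1)) (some q.2)
        if chunk ≠ [] then chunks ++ [chunk] else chunks) acc
    = acc ++ (L.map (fun q => PySem.List.slice logs (some (q.1 + 1)) (some q.2))).filter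
        (fun c => c ≠ []) := by
  induction L with
  | nil => intro acc; simp
  | cons q L ih =>
    intro acc
    simp only [List.foldl_cons]
    rw [ih]
    simp only [List.map_cons, List.filter_cons]
    by_cases h : PySem.List.slice logs (some (q.1 + 1)) (some q.2) = []
    · simp [h]
    · simp [h]

lemma chunking_alt_eq_segs (logs : List String) :
    chunking_alt logs = (pvSegs logs).filter (fun c => c ≠ []) := by
  have hmarks := marks_eq logs 0
  simp only [add_zero] at hmarks
  have hlist : (pvMarksN logs).map (fun (n : Nat) => (n : Int)) ++ [(logs.length : Int)]
      = (pvMarksN logs ++ [logs.length]).map (fun (n : Nat) => (n : Int)) := by simp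
  simp only [chunking_alt, List.tail_cons]
  rw [hmarks, hlist, foldl_if_append_slices, zip_bounds_eq, sliceChunks_eq_segs,
      List.nil_append]

-- ===== VERDICT (by name: the statement is the Claim_ definition above) =====
theorem chunking_spec : Claim_equal_chunking := by
  intro logs _
  unfold Spec_chunking
  rw [chunking_eq_segs, chunking_alt_eq_segs]
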